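-- pv_equiv track=rewrite | github.com/Kishore276/AI-Agent | complete_qa_audit_and_fix.py | has_generic_wrong_patterns
-- ===== SOURCE A (Python) =====
-- def has_generic_wrong_patterns(answer: str) -> bool:
--     """Check for generic wrong answer patterns"""
--     wrong_patterns = [
--         "for detailed information about",
--         "please visit the official website",
--         "contact the admission office",
--         "our counselors are available",
--         "committed to providing quality engineering education",
--         "has excellent infrastructure including modern laboratories",
--         "various it and engineering companies visit campus"
--     ]
--     return any(pattern in answer.lower() for pattern in wrong_patterns)
-- ===== SOURCE B (Python) =====
-- def has_generic_wrong_patterns(answer: str) -> bool: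
--     """Check for generic wrong answer patterns (single left-to-right position scan)."""
--     wrong_patterns = [
--         "for detailed information about",
--         "please visit the official website",
--         "contact the admission office",
--         "our counselors are available",
--         "committed to providing quality engineering education",
--         "has excellent infrastructure including modern laboratories",
--         "various it and engineering companies visit campus"
--     ]
--     s = answer.lower()
--     for i in range(len(s) + 1):
--         for p in wrong_patterns:
--             if s.startswith(p, i):
--                 return True
--     return False
-- ===== Notes on version B (the rewrite author's own statement) =====
-- stated objective: alternative
-- what changed: Replaces seven independent whole-string substring scans ('pattern in s' per pattern) by one left-to-right scan over the positions of the lowercased answer, testing at each position whether any pattern starts there (prefix match), so the string is traversed once position-major instead of pattern-major.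
import Mathlib
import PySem

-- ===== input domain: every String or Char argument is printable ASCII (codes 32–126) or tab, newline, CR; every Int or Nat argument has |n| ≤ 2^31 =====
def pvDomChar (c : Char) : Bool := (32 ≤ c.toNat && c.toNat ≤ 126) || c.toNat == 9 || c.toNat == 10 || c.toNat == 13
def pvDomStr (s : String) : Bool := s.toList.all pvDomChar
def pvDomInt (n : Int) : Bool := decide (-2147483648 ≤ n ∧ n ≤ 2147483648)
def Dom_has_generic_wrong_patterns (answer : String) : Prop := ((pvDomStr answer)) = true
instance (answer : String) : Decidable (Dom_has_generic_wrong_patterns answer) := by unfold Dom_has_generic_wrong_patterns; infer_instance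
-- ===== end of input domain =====

-- ===== PORT A =====
-- B changes the traversal only: one position-major scan over the lowercased answer (prefix test
-- at each start position) instead of seven independent pattern-major substring scans; same value.
def gwPatterns : List String := [
  "for detailed information about",
  "please visit the official website",
  "contact the admission office",
  "our counselors are available",
  "committed to providing quality engineering education",
  "has excellent infrastructure including modern laboratories",
  "various it and engineering companies visit campus"
]

-- A: any(pattern in answer.lower() for pattern in wrong_patterns)
def has_generic_wrong_patterns (answer : String) : Bool :=
  gwPatterns.any (fun pattern => PySem.Str.isIn pattern (PySem.Str.lower answer))

-- ===== PORT B =====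
-- B's inner check 's.startswith(p, i)' on the suffix of s starting at i; the outer loop over
-- i = 0..len(s) is the structural recursion over the suffixes of the lowercased char list.
def gwScan (pats : List (List Char)) : List Char → Bool
  | [] => pats.any (fun p => p.isPrefixOf ([] : List Char))
  | c :: rest => pats.any (fun p => p.isPrefixOf (c :: rest)) || gwScan pats rest

def has_generic_wrong_patterns_alt (answer : String) : Bool :=
  gwScan (gwPatterns.map String.toList) (PySem.Str.lower answer).toList

-- ===== PRECONDITION & SPEC =====
def Spec_has_generic_wrong_patterns (answer : String) (out : Bool) : Prop := out = has_generic_wrong_patterns_alt answer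
instance (answer : String) (out : Bool) : Decidable (Spec_has_generic_wrong_patterns answer out) := by unfold Spec_has_generic_wrong_patterns; infer_instance

-- ===== CLAIM (what is proved, stated in full; the proofs are below) =====
def Claim_equal_has_generic_wrong_patterns : Prop := ∀ (answer : String), Dom_has_generic_wrong_patterns answer → Spec_has_generic_wrong_patterns answer (has_generic_wrong_patterns answer)

-- ===== LEMMAS AND PROOFS =====

theorem gwScan_iff (pats : List (List Char)) (l : List Char) :
    gwScan pats l = true ↔ ∃ p ∈ pats, p <:+: l := by
  induction l with
  | nil =>
    simp only [gwScan, List.any_eq_true, List.isPrefixOf_iff_prefix]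
    constructor
    · rintro ⟨p, hp, h⟩; exact ⟨p, hp, h.isInfix⟩
    · rintro ⟨p, hp, h⟩
      rcases h with ⟨u, v, huv⟩
      simp only [List.append_eq_nil_iff] at huv
      exact ⟨p, hp, huv.1.2 ▸ List.prefix_refl ([] : List Char)⟩
  | cons c rest ih =>
    simp only [gwScan, Bool.or_eq_true, List.any_eq_true, List.isPrefixOf_iff_prefix, ih]
    constructor
    · rintro (⟨p, hp, h⟩ | ⟨p, hp, h⟩)
      · exact ⟨p, hp, h.isInfix⟩
      · exact ⟨p, hp, h.trans (List.infix_cons (List.infix_refl rest))⟩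
    · rintro ⟨p, hp, h⟩
      rcases List.infix_iff_prefix_suffix.mp h with ⟨t, hpre, hsuf⟩
      rcases List.suffix_cons_iff.mp hsuf with h1 | h1
      · exact Or.inl ⟨p, hp, h1 ▸ hpre⟩
      · exact Or.inr ⟨p, hp, hpre.isInfix.trans h1.isInfix⟩

-- ===== VERDICT (by name: the statement is the Claim_ definition above) =====
theorem has_generic_wrong_patterns_spec : Claim_equal_has_generic_wrong_patterns := by
  intro answer _
  unfold Spec_has_generic_wrong_patterns has_generic_wrong_patterns has_generic_wrong_patterns_alt
  rw [Bool.eq_iff_iff, List.any_eq_true, gwScan_iff]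
  constructor
  · rintro ⟨p, hp, h⟩
    refine ⟨p.toList, List.mem_map_of_mem hp, ?_⟩
    rw [PySem.Str.isIn_eq] at h
    exact (PySem.Chars.isIn_iff_infix _ _).mp h
  · rintro ⟨pl, hpl, h⟩
    rcases List.mem_map.mp hpl with ⟨p, hp, rfl⟩
    exact ⟨p, hp, (PySem.Str.isIn_eq _ _).trans (of_eq_true (eq_true ((PySem.Chars.isIn_iff_infix _ _).mpr h)))⟩
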